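-- pv_equiv track=rewrite | github.com/nomadsgalaxy/Prusa-Firmware-Buddy | utils/cyphal_dump.py | unpack_service_id_list
-- ===== SOURCE A (Python) =====
-- def unpack_bytes(data, n):
--     return data[:n], data[n:]
--
-- def unpack_service_id_list(data):
--     """Unpack ServiceIDList.1.0 (bool[512] mask)"""
--     # ServiceIDList is a fixed-size bitmask of 512 bits = 64 bytes
--     mask_bytes, data = unpack_bytes(data, 64)
--
--     # Convert to list of active service IDs
--     active_services = []
--     for byte_idx, byte_val in enumerate(mask_bytes):
--         for bit_idx in range(8):
--             if byte_val & (1 << bit_idx):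
--                 service_id = byte_idx * 8 + bit_idx
--                 active_services.append(service_id)
--
--     if active_services:
--         return f'services[{",".join(map(str, active_services))}]', data
--     else:
--         return 'services[]', data
-- ===== SOURCE B (Python) =====
-- def _bits(m):
--     # indices of the set bits of m (ascending), walking only the set bits
--     out = []
--     while m:
--         lsb = m & -m
--         out.append(lsb.bit_length() - 1)
--         m &= m - 1
--     return out
--
-- def unpack_service_id_list(data):
--     """Unpack ServiceIDList.1.0 (bool[512] mask)"""
--     ids = []
--     for i, b in enumerate(data[:64]):
--         ids.extend(8 * i + j for j in _bits(b & 0xFF))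
--     return 'services[%s]' % ','.join(map(str, ids)), data[64:]
-- ===== Notes on version B (the rewrite author's own statement) =====
-- stated objective: alternative
-- what changed: Instead of testing all 8 bit positions of every mask byte, B extracts each byte's set bits directly with the lowest-set-bit trick (m & -m, bit_length, m &= m-1), visiting only the active bits, and drops A's empty/non-empty branch since joining an empty list already yields 'services[]'.
import Mathlib
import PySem

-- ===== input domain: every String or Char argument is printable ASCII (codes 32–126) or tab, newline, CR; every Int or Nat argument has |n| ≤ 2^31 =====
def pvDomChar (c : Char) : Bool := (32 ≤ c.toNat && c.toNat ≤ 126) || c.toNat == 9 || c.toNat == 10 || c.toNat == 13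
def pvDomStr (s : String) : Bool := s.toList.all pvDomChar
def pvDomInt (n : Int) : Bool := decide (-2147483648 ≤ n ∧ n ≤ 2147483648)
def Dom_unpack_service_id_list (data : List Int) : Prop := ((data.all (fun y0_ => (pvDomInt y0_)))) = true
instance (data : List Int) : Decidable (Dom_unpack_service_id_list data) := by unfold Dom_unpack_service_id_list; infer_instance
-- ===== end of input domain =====

-- B walks only the set bits of each mask byte (lowest-set-bit extraction) instead of testing all 8 bit positions per byte; objective: alternative.

-- ===== PORT A =====
def unpack_bytes (data : List Int) (n : Int) : List Int × List Int :=
  (PySem.List.slice data none (some n), PySem.List.slice data (some n) none)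

def unpack_service_id_list (data : List Int) : String × List Int :=
  let p := unpack_bytes data 64
  let mask_bytes := p.1
  let rest := p.2
  let active_services : List Int :=
    (PySem.List.enumerate mask_bytes).foldl (fun acc bv =>
      (PySem.List.pyRange 0 8 1).foldl (fun acc bit_idx =>
        -- '1 << bit_idx': bit_idx ∈ [0,8), so .toNat is exact
        if PySem.Int.band bv.2 ((1 : Int) <<< ((bit_idx.toNat : Nat) : Int)) != 0 then
          acc ++ [bv.1 * 8 + bit_idx]
        else acc) acc) []
  if active_services ≠ [] then
    ("services[" ++ PySem.Str.join "," (active_services.map PySem.Int.toStr) ++ "]", rest)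
  else
    ("services[]", rest)

-- ===== PORT B =====
-- the 'while m:' loop of _bits; only ever called with 0 ≤ m < 256, so 8 iterations
-- always suffice and a fuel of 8 makes the loop structural
def bitsLoop : Nat → Int → List Int → List Int
  | 0, _, out => out
  | fuel + 1, m, out =>
    if m != 0 then
      let lsb := PySem.Int.band m (-m)
      bitsLoop fuel (PySem.Int.band m (m - 1)) (out ++ [((PySem.Int.bitLength lsb : Int)) - 1])
    else out

def pyBits (m : Int) : List Int := bitsLoop 8 m []

def unpack_service_id_list_alt (data : List Int) : String × List Int :=
  let ids : List Int :=
    (PySem.List.enumerate (PySem.List.slice data none (some 64))).foldl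
      (fun acc ib => acc ++ (pyBits (PySem.Int.band ib.2 255)).map (fun j => 8 * ib.1 + j)) []
  ("services[" ++ PySem.Str.join "," (ids.map PySem.Int.toStr) ++ "]",
   PySem.List.slice data (some 64) none)

-- ===== PRECONDITION & SPEC =====
def Spec_unpack_service_id_list (data : List Int) (out : String × List Int) : Prop := out = unpack_service_id_list_alt data
instance (data : List Int) (out : String × List Int) : Decidable (Spec_unpack_service_id_list data out) := by unfold Spec_unpack_service_id_list; infer_instance

-- ===== CLAIM (what is proved, stated in full; the proofs are below) =====
def Claim_equal_unpack_service_id_list : Prop := ∀ (data : List Int), Dom_unpack_service_id_list data → Spec_unpack_service_id_list data (unpack_service_id_list data)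

-- ===== LEMMAS AND PROOFS =====

theorem one_shl (j : Nat) : (1 : Int) <<< ((j : Nat) : Int) = ((2 ^ j : Nat) : Int) := by
  have h : (1 : Int) <<< ((j : Nat) : Int) = ((Nat.shiftLeft' false 1 j : Nat) : Int) := rfl
  rw [h, Nat.shiftLeft'_false, Nat.shiftLeft_eq, one_mul]

theorem band255_bounds (b : Int) : 0 ≤ PySem.Int.band b 255 ∧ PySem.Int.band b 255 < 256 := by
  unfold PySem.Int.band
  split_ifs with h1 h2 h2
  · refine ⟨by positivity, ?_⟩
    have : b.toNat &&& (255 : Int).toNat ≤ (255 : Int).toNat := Nat.and_le_right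
    omega
  · omega
  · refine ⟨by positivity, ?_⟩
    have : (255 : Int).toNat - ((255 : Int).toNat &&& (-b - 1).toNat) ≤ (255 : Int).toNat :=
      Nat.sub_le _ _
    omega
  · omega

theorem pow_and_255 (j : Nat) (hj : j < 8) : 2 ^ j &&& 255 = 2 ^ j := by
  interval_cases j <;> decide

-- core of the negative-byte case, checked over all 256 low bytes and 8 bit positions
set_option maxRecDepth 10000 in
theorem neg_case_core : ∀ (r : Fin 256) (j : Fin 8),
    (2 ^ (j : Nat) - (2 ^ (j : Nat) &&& (r : Nat)) ≠ 0 ↔ (255 - (r : Nat)) &&& 2 ^ (j : Nat) ≠ 0) := by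
  decide

-- testing bit j (j < 8) of b is the same as testing bit j of b's low byte b & 255
theorem band_low (b : Int) (j : Nat) (hj : j < 8) :
    (PySem.Int.band b ((1 : Int) <<< ((j : Nat) : Int)) != 0) =
      (PySem.Int.band (PySem.Int.band b 255) ((1 : Int) <<< ((j : Nat) : Int)) != 0) := by
  rw [one_shl]
  by_cases hb : 0 ≤ b
  · have h1 : PySem.Int.band b 255 = ((b.toNat &&& 255 : Nat) : Int) := by
      unfold PySem.Int.band
      rw [if_pos hb, if_pos (by norm_num : (0:Int) ≤ 255),
        (by decide : (255 : Int).toNat = 255)]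
    have h2 : PySem.Int.band b ((2 ^ j : Nat) : Int) = ((b.toNat &&& 2 ^ j : Nat) : Int) := by
      unfold PySem.Int.band
      rw [if_pos hb, if_pos (by positivity : (0:Int) ≤ ((2 ^ j : Nat) : Int)), Int.toNat_natCast]
    rw [h1, h2, PySem.Int.band_natCast]
    rw [Nat.and_assoc, Nat.and_comm 255 (2 ^ j), pow_and_255 j hj]
  · have h1 : PySem.Int.band b 255 = ((255 - (255 &&& (-b - 1).toNat) : Nat) : Int) := by
      unfold PySem.Int.band
      rw [if_neg hb, if_pos (by norm_num : (0:Int) ≤ 255),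
        (by decide : (255 : Int).toNat = 255)]
    have h2 : PySem.Int.band b ((2 ^ j : Nat) : Int) =
        ((2 ^ j - (2 ^ j &&& (-b - 1).toNat) : Nat) : Int) := by
      unfold PySem.Int.band
      rw [if_neg hb, if_pos (by positivity : (0:Int) ≤ ((2 ^ j : Nat) : Int)), Int.toNat_natCast]
    set k := (-b - 1).toNat with hk
    have hrlt : (255 &&& k : Nat) < 256 := by
      have : (255 &&& k : Nat) ≤ 255 := Nat.and_le_left
      omega
    have hjk : 2 ^ j &&& k = 2 ^ j &&& (255 &&& k) := by
      conv_lhs => rw [← pow_and_255 j hj, Nat.and_assoc]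
    have hcore := neg_case_core ⟨255 &&& k, hrlt⟩ ⟨j, hj⟩
    rw [h1, h2, PySem.Int.band_natCast]
    rw [Bool.eq_iff_iff]
    simp only [bne_iff_ne, ne_eq, Int.natCast_eq_zero]
    rw [hjk]
    exact hcore

-- the lsb walk over a low byte m < 256 lists exactly the bit positions 0..7 set in m,
-- in ascending order; checked over all 256 low bytes
set_option maxRecDepth 10000 in
theorem perByteFin : ∀ v : Fin 256, pyBits ((v : Nat) : Int) =
    ([0, 1, 2, 3, 4, 5, 6, 7] : List Int).filter
      (fun j => PySem.Int.band ((v : Nat) : Int) ((1 : Int) <<< ((j.toNat : Nat) : Int)) != 0) := by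
  decide

theorem perByte (b : Int) : pyBits (PySem.Int.band b 255) =
    (PySem.List.pyRange 0 8 1).filter
      (fun j => PySem.Int.band b ((1 : Int) <<< ((j.toNat : Nat) : Int)) != 0) := by
  have hrange : PySem.List.pyRange 0 8 1 = ([0, 1, 2, 3, 4, 5, 6, 7] : List Int) := by decide
  obtain ⟨h0, h256⟩ := band255_bounds b
  have hcast : (((PySem.Int.band b 255).toNat : Nat) : Int) = PySem.Int.band b 255 :=
    Int.toNat_of_nonneg h0
  have hfin := perByteFin ⟨(PySem.Int.band b 255).toNat, by omega⟩
  rw [hcast] at hfin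
  rw [hrange, hfin]
  apply List.filter_congr
  intro j hj
  have hj8 : j.toNat < 8 := by
    fin_cases hj <;> decide
  exact (band_low b j.toNat hj8).symm

theorem ids_eq (mb : List Int) (acc : List Int) :
    (PySem.List.enumerate mb).foldl (fun acc bv =>
        (PySem.List.pyRange 0 8 1).foldl (fun acc bit_idx =>
          if PySem.Int.band bv.2 ((1 : Int) <<< ((bit_idx.toNat : Nat) : Int)) != 0 then
            acc ++ [bv.1 * 8 + bit_idx]
          else acc) acc) acc =
      (PySem.List.enumerate mb).foldl
        (fun acc ib => acc ++ (pyBits (PySem.Int.band ib.2 255)).map (fun j => 8 * ib.1 + j)) acc := by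
  have hstep : (fun (acc : List Int) (bv : Int × Int) =>
        (PySem.List.pyRange 0 8 1).foldl (fun acc bit_idx =>
          if PySem.Int.band bv.2 ((1 : Int) <<< ((bit_idx.toNat : Nat) : Int)) != 0 then
            acc ++ [bv.1 * 8 + bit_idx]
          else acc) acc) =
      (fun (acc : List Int) (ib : Int × Int) =>
        acc ++ (pyBits (PySem.Int.band ib.2 255)).map (fun j => 8 * ib.1 + j)) := by
    funext a bv
    rw [PySem.List.foldl_append_if
      (fun bit_idx => PySem.Int.band bv.2 ((1 : Int) <<< ((bit_idx.toNat : Nat) : Int)) != 0)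
      (fun bit_idx => bv.1 * 8 + bit_idx)]
    rw [perByte bv.2]
    congr 1
    apply List.map_congr_left
    intro j _
    ring
  rw [hstep]

-- ===== VERDICT (by name: the statement is the Claim_ definition above) =====
theorem unpack_service_id_list_spec : Claim_equal_unpack_service_id_list := by
  intro data _
  unfold Spec_unpack_service_id_list unpack_service_id_list unpack_service_id_list_alt unpack_bytes
  dsimp only
  rw [ids_eq]
  set ids := (PySem.List.enumerate (PySem.List.slice data none (some 64))).foldl
    (fun acc ib => acc ++ (pyBits (PySem.Int.band ib.2 255)).map (fun j => 8 * ib.1 + j)) ([] : List Int) with hids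
  by_cases h : ids = []
  · rw [if_neg (by simp [h]), h]
    simp only [Prod.mk.injEq]
    exact ⟨by decide, trivial⟩
  · rw [if_pos h]
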